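-- pv_equiv track=rewrite | github.com/aryanoutlaw/AdventofCode2024 | Q3.py | parse_memory_part1
-- ===== SOURCE A (Python) =====
-- def parse_memory_part1(text):
--
--     total = 0
--     i = 0
--
--     while i < len(text):
--
--         if i + 3 < len(text) and text[i:i+4] == "mul(":
--             i += 4
--             try:
--
--                 num1 = ""
--                 while i < len(text) and text[i].isdigit():
--                     num1 += text[i]
--                     i += 1
--
--                 # Skip comma
--                 if i < len(text) and text[i] == ",":
--                     i += 1
--                 else:
--                     continue
--
--                 # Get second number
--                 num2 = ""
--                 while i < len(text) and text[i].isdigit():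
--                     num2 += text[i]
--                     i += 1
--
--                 # Verify closing parenthesis
--                 if i < len(text) and text[i] == ")":
--                     if num1 and num2:
--                         total += int(num1) * int(num2)
--             except:
--                 pass
--         i += 1
--
--     return total
-- ===== SOURCE B (Python) =====
-- def parse_memory_part1(text):
--     # Single-pass DFA: one state per progress point of "mul(num1,num2)", with
--     # numeric accumulators, instead of A's slice comparisons and rescans.
--     S0, S1, S2, S3, S4, S5 = range(6)  # seen: -, m, mu, mul, mul(, mul(num1,
--     total = 0
--     state = S0
--     n1 = n2 = 0
--     has1 = has2 = False
--     for ch in text: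
--         if state == S4:
--             if ch.isdigit():
--                 n1 = 10 * n1 + int(ch)
--                 has1 = True
--             elif ch == ",":
--                 state = S5
--                 n2 = 0
--                 has2 = False
--             elif ch == "m":
--                 state = S1
--             else:
--                 state = S0
--         elif state == S5:
--             if ch.isdigit():
--                 n2 = 10 * n2 + int(ch)
--                 has2 = True
--             else:
--                 if ch == ")" and has1 and has2:
--                     total += n1 * n2
--                 state = S0
--         elif ch == "m":
--             state = S1
--         elif state == S1 and ch == "u":
--             state = S2
--         elif state == S2 and ch == "l":
--             state = S3
--         elif state == S3 and ch == "(":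
--             state = S4
--             n1 = 0
--             has1 = False
--         else:
--             state = S0
--     return total
-- ===== Notes on version B (the rewrite author's own statement) =====
-- stated objective: alternative
-- what changed: Replaces A's slice-compare-at-each-index parser with manual rescans and string building by a single forward pass of a 6-state finite state machine that folds digits into integer accumulators as it goes; return values are identical.
import Mathlib
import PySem

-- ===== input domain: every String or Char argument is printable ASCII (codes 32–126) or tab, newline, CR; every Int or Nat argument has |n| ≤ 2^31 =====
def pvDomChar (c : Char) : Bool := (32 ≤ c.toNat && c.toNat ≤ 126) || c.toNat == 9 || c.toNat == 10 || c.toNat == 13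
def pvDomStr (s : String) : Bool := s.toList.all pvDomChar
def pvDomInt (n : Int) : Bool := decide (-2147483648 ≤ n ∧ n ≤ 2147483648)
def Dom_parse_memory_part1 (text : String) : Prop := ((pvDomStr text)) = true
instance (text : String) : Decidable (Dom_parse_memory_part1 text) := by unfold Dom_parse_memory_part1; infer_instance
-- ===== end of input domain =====

-- B replaces A's slice-compare-and-rescan parser with a single-pass character-at-a-time
-- finite state machine with numeric accumulators; the return values are identical.

-- ===== PORT A =====
-- A's while loop over index i, rendered as recursion on the suffix text[i:], with a
-- Nat fuel as a pure totality guard (the suffix shrinks every iteration, so the fuel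
-- length+1 supplied by parse_memory_part1 is never exhausted).
-- text[i].isdigit() is Char.isDigit (exact on the ASCII domain); the two inner
-- digit-accumulating while loops are takeWhile/dropWhile of the suffix; the
-- bounds-checked "i < len(text) and text[i] == c" tests are head? = some c; 'i += 1'
-- is .tail; the `continue` on a missing comma keeps the position (recurse on r1);
-- int(num) on the collected digit string is digitsValA (exact on digit strings).
def digitsValA (ds : List Char) : Int :=
  ds.foldl (fun a c => 10 * a + ((c.toNat : Int) - 48)) 0

def loopA : Nat → List Char → Int → Int
  | 0, _, total => total
  | n + 1, cs, total =>
    if cs = [] then total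
    else if cs.take 4 = ['m', 'u', 'l', '('] then
      let num1 := (cs.drop 4).takeWhile Char.isDigit
      let r1 := (cs.drop 4).dropWhile Char.isDigit
      if r1.head? = some ',' then
        let num2 := r1.tail.takeWhile Char.isDigit
        let r2 := r1.tail.dropWhile Char.isDigit
        loopA n r2.tail
          (if r2.head? = some ')' then
             if num1 ≠ [] ∧ num2 ≠ [] then total + digitsValA num1 * digitsValA num2
             else total
           else total)
      else loopA n r1 total
    else loopA n cs.tail total

def parse_memory_part1 (text : String) : Int :=
  loopA (text.toList.length + 1) text.toList 0

-- ===== PORT B =====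
-- B's loop variables (state, n1, has1, n2, has2, total) as one record; states:
-- 0 = scanning, 1 = seen "m", 2 = "mu", 3 = "mul", 4 = reading num1, 5 = reading num2.
structure StB where
  tag : Nat
  n1 : Int
  h1 : Bool
  n2 : Int
  h2 : Bool
  total : Int

-- one iteration of B's for loop, branch for branch; int(ch) is c.toNat - 48.
def stepB (s : StB) (c : Char) : StB :=
  if s.tag = 4 then
    if c.isDigit then { s with n1 := 10 * s.n1 + ((c.toNat : Int) - 48), h1 := true }
    else if c = ',' then { s with tag := 5, n2 := 0, h2 := false }
    else if c = 'm' then { s with tag := 1 }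
    else { s with tag := 0 }
  else if s.tag = 5 then
    if c.isDigit then { s with n2 := 10 * s.n2 + ((c.toNat : Int) - 48), h2 := true }
    else
      let t' := if c = ')' ∧ s.h1 = true ∧ s.h2 = true then s.total + s.n1 * s.n2 else s.total
      { s with tag := 0, total := t' }
  else if c = 'm' then { s with tag := 1 }
  else if s.tag = 1 ∧ c = 'u' then { s with tag := 2 }
  else if s.tag = 2 ∧ c = 'l' then { s with tag := 3 }
  else if s.tag = 3 ∧ c = '(' then { s with tag := 4, n1 := 0, h1 := false }
  else { s with tag := 0 }

def parse_memory_part1_alt (text : String) : Int :=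
  (text.toList.foldl stepB ⟨0, 0, false, 0, false, 0⟩).total

-- ===== PRECONDITION & SPEC =====
def Spec_parse_memory_part1 (text : String) (out : Int) : Prop := out = parse_memory_part1_alt text
instance (text : String) (out : Int) : Decidable (Spec_parse_memory_part1 text out) := by unfold Spec_parse_memory_part1; infer_instance

-- ===== CLAIM (what is proved, stated in full; the proofs are below) =====
def Claim_equal_parse_memory_part1 : Prop := ∀ (text : String), Dom_parse_memory_part1 text → Spec_parse_memory_part1 text (parse_memory_part1 text)

-- ===== LEMMAS AND PROOFS =====

-- loopA does not depend on the exact fuel once it exceeds the suffix length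
theorem loopA_fuel (n m : Nat) (cs : List Char) (t : Int)
    (hn : cs.length < n) (hm : cs.length < m) : loopA n cs t = loopA m cs t := by
  induction n generalizing m cs t with
  | zero => omega
  | succ n ih =>
    cases m with
    | zero => omega
    | succ m =>
      simp only [loopA]
      by_cases hnil : cs = []
      · simp [hnil]
      rw [if_neg hnil, if_neg hnil]
      by_cases hmul : cs.take 4 = ['m', 'u', 'l', '(']
      · rw [if_pos hmul, if_pos hmul]
        have h4 : 4 ≤ cs.length := by
          have := congrArg List.length hmul
          rw [List.length_take] at this; simp at this; omega
        have l1 := List.length_dropWhile_le (p := Char.isDigit) (cs.drop 4)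
        by_cases hc : ((cs.drop 4).dropWhile Char.isDigit).head? = some ','
        · rw [if_pos hc, if_pos hc]
          have l2 := List.length_dropWhile_le (p := Char.isDigit)
            ((cs.drop 4).dropWhile Char.isDigit).tail
          apply ih <;>
            simp only [List.length_tail, List.length_drop] at * <;> omega
        · rw [if_neg hc, if_neg hc]
          apply ih <;> simp only [List.length_drop] at * <;> omega
      · rw [if_neg hmul, if_neg hmul]
        apply ih <;> (cases cs with | nil => exact absurd rfl hnil | cons a l => simp at *; omega)

-- fuel-free wrapper for the proof
def runA (cs : List Char) (t : Int) : Int := loopA (cs.length + 1) cs t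

theorem runA_nil (t : Int) : runA [] t = t := rfl

theorem runA_cons_nomatch {c : Char} {r : List Char} (t : Int)
    (h : ¬ (c :: r).take 4 = ['m', 'u', 'l', '(']) : runA (c :: r) t = runA r t := by
  unfold runA
  rw [loopA, if_neg (by simp), if_neg h]
  simp only [List.tail_cons, List.length_cons]

theorem runA_match {cs : List Char} (t : Int)
    (h : cs.take 4 = ['m', 'u', 'l', '(']) :
    runA cs t =
      (let num1 := (cs.drop 4).takeWhile Char.isDigit
       let r1 := (cs.drop 4).dropWhile Char.isDigit
       if r1.head? = some ',' then
         let num2 := r1.tail.takeWhile Char.isDigit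
         let r2 := r1.tail.dropWhile Char.isDigit
         runA r2.tail
           (if r2.head? = some ')' then
              if num1 ≠ [] ∧ num2 ≠ [] then t + digitsValA num1 * digitsValA num2
              else t
            else t)
       else runA r1 t) := by
  have h4 : 4 ≤ cs.length := by
    have := congrArg List.length h
    rw [List.length_take] at this; simp at this; omega
  have hnil : cs ≠ [] := by intro hh; subst hh; simp at h4
  unfold runA
  rw [loopA, if_neg hnil, if_pos h]
  have l1 := List.length_dropWhile_le (p := Char.isDigit) (cs.drop 4)
  by_cases hc : ((cs.drop 4).dropWhile Char.isDigit).head? = some ','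
  · simp only [hc]
    have l2 := List.length_dropWhile_le (p := Char.isDigit)
      ((cs.drop 4).dropWhile Char.isDigit).tail
    exact loopA_fuel _ _ _ _
      (by simp only [List.length_tail, List.length_drop] at *; omega)
      (by simp only [List.length_tail, List.length_drop] at *; omega)
  · simp only [hc]
    exact loopA_fuel _ _ _ _
      (by simp only [List.length_drop] at *; omega)
      (by simp only [List.length_drop] at *; omega)

-- the DFA skips a maximal digit run in state 4, folding the digits into n1
theorem stepB_digits1 (ds r : List Char) (hd : ∀ c ∈ ds, c.isDigit)
    (n1 : Int) (h1 : Bool) (n2 : Int) (h2 : Bool) (t : Int) :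
    (ds ++ r).foldl stepB ⟨4, n1, h1, n2, h2, t⟩ =
      r.foldl stepB ⟨4, ds.foldl (fun a c => 10 * a + ((c.toNat : Int) - 48)) n1,
        h1 || !ds.isEmpty, n2, h2, t⟩ := by
  induction ds generalizing n1 h1 with
  | nil => simp
  | cons d ds ih =>
    have hdd : d.isDigit := hd d (by simp)
    simp only [List.cons_append, List.foldl_cons]
    rw [show stepB ⟨4, n1, h1, n2, h2, t⟩ d =
        ⟨4, 10 * n1 + ((d.toNat : Int) - 48), true, n2, h2, t⟩ by
      simp [stepB, hdd]]
    rw [ih (fun c hc => hd c (by simp [hc]))]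
    simp

-- same for state 5
theorem stepB_digits2 (ds r : List Char) (hd : ∀ c ∈ ds, c.isDigit)
    (n1 : Int) (h1 : Bool) (n2 : Int) (h2 : Bool) (t : Int) :
    (ds ++ r).foldl stepB ⟨5, n1, h1, n2, h2, t⟩ =
      r.foldl stepB ⟨5, n1, h1, ds.foldl (fun a c => 10 * a + ((c.toNat : Int) - 48)) n2,
        h2 || !ds.isEmpty, t⟩ := by
  induction ds generalizing n2 h2 with
  | nil => simp
  | cons d ds ih =>
    have hdd : d.isDigit := hd d (by simp)
    simp only [List.cons_append, List.foldl_cons]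
    rw [show stepB ⟨5, n1, h1, n2, h2, t⟩ d =
        ⟨5, n1, h1, 10 * n2 + ((d.toNat : Int) - 48), true, t⟩ by
      simp [stepB, hdd]]
    rw [ih (fun c hc => hd c (by simp [hc]))]
    simp

-- the core correspondence, by strong induction on the suffix length:
-- the DFA's total from each prefix state equals A's scan from the matching position.
theorem dfa_runA (N : Nat) : ∀ cs : List Char, cs.length ≤ N → ∀ (n1 : Int) (h1 : Bool) (n2 : Int) (h2 : Bool) (t : Int),
    ((cs.foldl stepB ⟨0, n1, h1, n2, h2, t⟩).total = runA cs t ∧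
     (cs.foldl stepB ⟨1, n1, h1, n2, h2, t⟩).total = runA ('m' :: cs) t ∧
     (cs.foldl stepB ⟨2, n1, h1, n2, h2, t⟩).total = runA ('m' :: 'u' :: cs) t ∧
     (cs.foldl stepB ⟨3, n1, h1, n2, h2, t⟩).total = runA ('m' :: 'u' :: 'l' :: cs) t) := by
  induction N with
  | zero =>
    intro cs hlen n1 h1 n2 h2 t
    have : cs = [] := List.eq_nil_of_length_eq_zero (by omega)
    subst this
    refine ⟨rfl, ?_, ?_, ?_⟩ <;>
      simp [runA_cons_nomatch, runA_nil, List.take]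
  | succ N ih =>
    intro cs hlen n1 h1 n2 h2 t
    match cs with
    | [] =>
      refine ⟨rfl, ?_, ?_, ?_⟩ <;>
        simp [runA_cons_nomatch, runA_nil, List.take]
    | c :: r =>
      have hr : r.length ≤ N := by simp at hlen; omega
      refine ⟨?_, ?_, ?_, ?_⟩
      · -- state 0
        by_cases hm : c = 'm'
        · subst hm
          rw [List.foldl_cons,
            show stepB ⟨0, n1, h1, n2, h2, t⟩ 'm' = ⟨1, n1, h1, n2, h2, t⟩ by
              simp [stepB]]
          exact (ih r hr n1 h1 n2 h2 t).2.1
        · rw [List.foldl_cons,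
            show stepB ⟨0, n1, h1, n2, h2, t⟩ c = ⟨0, n1, h1, n2, h2, t⟩ by
              simp [stepB, hm]]
          rw [runA_cons_nomatch t (by
            intro hh
            exact hm (by simpa using congrArg (·.head?) hh))]
          exact (ih r hr n1 h1 n2 h2 t).1
      · -- state 1 : position at 'm' :: c :: r
        by_cases hm : c = 'm'
        · subst hm
          rw [List.foldl_cons,
            show stepB ⟨1, n1, h1, n2, h2, t⟩ 'm' = ⟨1, n1, h1, n2, h2, t⟩ by
              simp [stepB]]
          rw [runA_cons_nomatch t (by simp [List.take])]
          exact (ih r hr n1 h1 n2 h2 t).2.1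
        by_cases hu : c = 'u'
        · subst hu
          rw [List.foldl_cons,
            show stepB ⟨1, n1, h1, n2, h2, t⟩ 'u' = ⟨2, n1, h1, n2, h2, t⟩ by
              simp [stepB]]
          exact (ih r hr n1 h1 n2 h2 t).2.2.1
        · rw [List.foldl_cons,
            show stepB ⟨1, n1, h1, n2, h2, t⟩ c = ⟨0, n1, h1, n2, h2, t⟩ by
              simp [stepB, hm, hu]]
          rw [runA_cons_nomatch t (by simp [List.take, hu]),
              runA_cons_nomatch t (by
                intro hh
                exact hm (by simpa using congrArg (·.head?) hh))]
          exact (ih r hr n1 h1 n2 h2 t).1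
      · -- state 2 : position at 'm' :: 'u' :: c :: r
        by_cases hm : c = 'm'
        · subst hm
          rw [List.foldl_cons,
            show stepB ⟨2, n1, h1, n2, h2, t⟩ 'm' = ⟨1, n1, h1, n2, h2, t⟩ by
              simp [stepB]]
          rw [runA_cons_nomatch t (by simp [List.take]),
              runA_cons_nomatch t (by simp [List.take])]
          exact (ih r hr n1 h1 n2 h2 t).2.1
        by_cases hl : c = 'l'
        · subst hl
          rw [List.foldl_cons,
            show stepB ⟨2, n1, h1, n2, h2, t⟩ 'l' = ⟨3, n1, h1, n2, h2, t⟩ by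
              simp [stepB]]
          exact (ih r hr n1 h1 n2 h2 t).2.2.2
        · rw [List.foldl_cons,
            show stepB ⟨2, n1, h1, n2, h2, t⟩ c = ⟨0, n1, h1, n2, h2, t⟩ by
              simp [stepB, hm, hl]]
          rw [runA_cons_nomatch t (by simp [List.take, hl]),
              runA_cons_nomatch t (by simp [List.take]),
              runA_cons_nomatch t (by
                intro hh
                exact hm (by simpa using congrArg (·.head?) hh))]
          exact (ih r hr n1 h1 n2 h2 t).1
      · -- state 3 : position at 'm' :: 'u' :: 'l' :: c :: r
        by_cases hm : c = 'm'
        · subst hm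
          rw [List.foldl_cons,
            show stepB ⟨3, n1, h1, n2, h2, t⟩ 'm' = ⟨1, n1, h1, n2, h2, t⟩ by
              simp [stepB]]
          rw [runA_cons_nomatch t (by simp [List.take]),
              runA_cons_nomatch t (by simp [List.take]),
              runA_cons_nomatch t (by simp [List.take])]
          exact (ih r hr n1 h1 n2 h2 t).2.1
        by_cases hp : c = '('
        · -- the match case: A parses "mul(" ++ r, the DFA enters state 4 on r
          subst hp
          rw [List.foldl_cons,
            show stepB ⟨3, n1, h1, n2, h2, t⟩ '(' = ⟨4, 0, false, n2, h2, t⟩ by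
              simp [stepB]]
          rw [runA_match t (by simp [List.take])]
          simp only [List.drop_succ_cons, List.drop_zero]
          -- split r into its digit prefix and the rest
          have hsplit1 : r = r.takeWhile Char.isDigit ++ r.dropWhile Char.isDigit :=
            (List.takeWhile_append_dropWhile).symm
          rw [show r.foldl stepB ⟨4, 0, false, n2, h2, t⟩ =
              (r.takeWhile Char.isDigit ++ r.dropWhile Char.isDigit).foldl stepB
                ⟨4, 0, false, n2, h2, t⟩ by rw [← hsplit1]]
          rw [stepB_digits1 _ _ (fun c hc => List.mem_takeWhile_imp hc) 0 false n2 h2 t]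
          have hlen1 := List.length_dropWhile_le (p := Char.isDigit) r
          set num1 := r.takeWhile Char.isDigit with hnum1
          set r1 := r.dropWhile Char.isDigit with hr1
          have hval1 : num1.foldl (fun a c => 10 * a + ((c.toNat : Int) - 48)) 0
              = digitsValA num1 := rfl
          simp only [Bool.false_or]
          rw [hval1]
          match hr1e : r1 with
          | [] => simp [runA_nil]
          | c1 :: rr =>
            have hc1 : ¬ c1.isDigit := by
              have := List.head?_dropWhile_not (p := Char.isDigit) r
              rw [← hr1] at this
              simpa using this
            have hrr : rr.length ≤ N := by
              have h' : (c1 :: rr).length ≤ r.length := hlen1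
              simp at h'; omega
            by_cases hcomma : c1 = ','
            · subst hcomma
              simp only [List.head?_cons, List.tail_cons, reduceIte]
              rw [List.foldl_cons,
                show stepB ⟨4, digitsValA num1, !num1.isEmpty, n2, h2, t⟩ ',' =
                  ⟨5, digitsValA num1, !num1.isEmpty, 0, false, t⟩ by
                  simp [stepB]]
              -- split rr into digit prefix and rest
              rw [show rr.foldl stepB ⟨5, digitsValA num1, !num1.isEmpty, 0, false, t⟩ =
                  (rr.takeWhile Char.isDigit ++ rr.dropWhile Char.isDigit).foldl stepB
                    ⟨5, digitsValA num1, !num1.isEmpty, 0, false, t⟩ by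
                  rw [List.takeWhile_append_dropWhile]]
              rw [stepB_digits2 _ _ (fun c hc => List.mem_takeWhile_imp hc)]
              have hlen2 := List.length_dropWhile_le (p := Char.isDigit) rr
              set num2 := rr.takeWhile Char.isDigit with hnum2
              set r2 := rr.dropWhile Char.isDigit with hr2
              have hval2 : num2.foldl (fun a c => 10 * a + ((c.toNat : Int) - 48)) 0
                  = digitsValA num2 := rfl
              simp only [Bool.false_or]
              rw [hval2]
              match hr2e : r2 with
              | [] => simp [runA_nil]
              | c2 :: qq =>
                have hc2 : ¬ c2.isDigit := by
                  have := List.head?_dropWhile_not (p := Char.isDigit) rr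
                  rw [← hr2] at this
                  simpa using this
                have hqq : qq.length ≤ N := by
                  have h' : (c2 :: qq).length ≤ rr.length := hlen2
                  simp at h'; omega
                simp only [List.head?_cons, List.tail_cons, List.foldl_cons]
                rw [show stepB ⟨5, digitsValA num1, !num1.isEmpty, digitsValA num2,
                      !num2.isEmpty, t⟩ c2 =
                    ⟨0, digitsValA num1, !num1.isEmpty, digitsValA num2, !num2.isEmpty,
                      if c2 = ')' ∧ (!num1.isEmpty) = true ∧ (!num2.isEmpty) = true
                      then t + digitsValA num1 * digitsValA num2 else t⟩ by
                    simp [stepB, hc2]]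
                rw [(ih qq hqq _ _ _ _ _).1]
                congr 1
                by_cases hpar : c2 = ')' <;>
                  by_cases he1 : num1 = [] <;> by_cases he2 : num2 = [] <;>
                    simp [hpar, he1, he2]
            · -- no comma: A continues from r1 = c1 :: rr without consuming it
              simp only [List.head?_cons, Option.some.injEq, hcomma, List.foldl_cons]
              rw [if_neg (by simp [hcomma])]
              by_cases hm1 : c1 = 'm'
              · subst hm1
                rw [show stepB ⟨4, digitsValA num1, !num1.isEmpty, n2, h2, t⟩ 'm' =
                    ⟨1, digitsValA num1, !num1.isEmpty, n2, h2, t⟩ by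
                    simp [stepB, hc1, hcomma]]
                exact (ih rr hrr _ _ _ _ _).2.1
              · rw [show stepB ⟨4, digitsValA num1, !num1.isEmpty, n2, h2, t⟩ c1 =
                    ⟨0, digitsValA num1, !num1.isEmpty, n2, h2, t⟩ by
                    simp [stepB, hc1, hcomma, hm1]]
                rw [runA_cons_nomatch t (by
                  intro hh
                  exact hm1 (by simpa using congrArg (·.head?) hh))]
                exact (ih rr hrr _ _ _ _ _).1
        · -- state 3, c neither 'm' nor '(' : back to scanning at r
          rw [List.foldl_cons,
            show stepB ⟨3, n1, h1, n2, h2, t⟩ c = ⟨0, n1, h1, n2, h2, t⟩ by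
              simp [stepB, hm, hp]]
          rw [runA_cons_nomatch t (by simp [List.take, hp]),
              runA_cons_nomatch t (by simp [List.take]),
              runA_cons_nomatch t (by simp [List.take]),
              runA_cons_nomatch t (by
                intro hh
                exact hm (by simpa using congrArg (·.head?) hh))]
          exact (ih r hr n1 h1 n2 h2 t).1

-- ===== VERDICT (by name: the statement is the Claim_ definition above) =====
theorem parse_memory_part1_spec : Claim_equal_parse_memory_part1 := by
  intro text _
  unfold Spec_parse_memory_part1 parse_memory_part1 parse_memory_part1_alt
  exact ((dfa_runA text.toList.length text.toList le_rfl 0 false 0 false 0).1).symm
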